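-- pv_equiv track=rewrite | github.com/DIRACGrid/DIRAC | src/DIRAC/Resources/Cloud/RocciEndpoint.py | __filterCommand
-- ===== SOURCE A (Python) =====
-- def __filterCommand(cmd):
--     filteredCmd = []
--     mask = False
--     for arg in cmd:
--         if mask:
--             filteredCmd.append("xxxxxx")
--             mask = False
--         else:
--             filteredCmd.append(arg)
--
--         if arg in ["--username", "--password"]:
--             mask = True
--     return " ".join(filteredCmd)
-- ===== SOURCE B (Python) =====
-- def __filterCommand(cmd):
--     out = list(cmd)
--     for i, arg in enumerate(cmd):
--         if arg in ("--username", "--password") and i + 1 < len(out):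
--             out[i + 1] = "xxxxxx"
--     return " ".join(out)
-- ===== Notes on version B (the rewrite author's own statement) =====
-- stated objective: alternative
-- what changed: Instead of A's single streaming pass that threads a mask flag through an output accumulator, B copies the list and patches in place the successor index of every --username/--password occurrence (locate-and-overwrite on a copy), then joins.
import Mathlib
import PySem

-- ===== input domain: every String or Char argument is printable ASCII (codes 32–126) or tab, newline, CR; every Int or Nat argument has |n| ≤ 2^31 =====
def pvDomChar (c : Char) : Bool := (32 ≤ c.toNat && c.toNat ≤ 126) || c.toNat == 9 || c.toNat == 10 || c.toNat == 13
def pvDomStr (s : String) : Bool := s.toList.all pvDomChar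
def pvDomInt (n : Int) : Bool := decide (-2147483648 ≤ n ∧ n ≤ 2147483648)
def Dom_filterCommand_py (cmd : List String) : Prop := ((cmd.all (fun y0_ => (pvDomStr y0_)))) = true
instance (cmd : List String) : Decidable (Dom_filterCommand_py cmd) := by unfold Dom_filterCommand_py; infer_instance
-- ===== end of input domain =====

-- B copies the list and patches the successor index of every --username/--password occurrence in place (locate-and-overwrite), instead of A's streaming pass threading a mask flag (alternative decomposition, same cost).


-- ===== PORT A =====
-- loop carrying (filteredCmd, mask); append in order, then flag check on the original arg
def filterCommand_py (cmd : List String) : String :=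
  PySem.Str.join " " (cmd.foldl (fun (st : List String × Bool) arg =>
    let st1 := if st.2 then (st.1 ++ ["xxxxxx"], false) else (st.1 ++ [arg], st.2)
    if arg = "--username" ∨ arg = "--password" then (st1.1, true) else st1) ([], false)).1

-- ===== PORT B =====
-- enumerate(cmd) as a list of (index, element) pairs, starting at i
def pvEnum (i : Nat) : List String → List (Nat × String)
  | [] => []
  | a :: rest => (i, a) :: pvEnum (i + 1) rest

-- out = list(cmd); for i, arg in enumerate(cmd): patch out[i+1] when arg is a flag; join
def filterCommand_py_alt (cmd : List String) : String :=
  PySem.Str.join " " ((pvEnum 0 cmd).foldl (fun out p =>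
    if (p.2 = "--username" ∨ p.2 = "--password") ∧ p.1 + 1 < out.length
    then out.set (p.1 + 1) "xxxxxx" else out) cmd)

-- ===== PRECONDITION & SPEC =====
def Spec_filterCommand_py (cmd : List String) (out : String) : Prop := out = filterCommand_py_alt cmd
instance (cmd : List String) (out : String) : Decidable (Spec_filterCommand_py cmd out) := by unfold Spec_filterCommand_py; infer_instance

-- ===== CLAIM (what is proved, stated in full; the proofs are below) =====
def Claim_equal_filterCommand_py : Prop := ∀ (cmd : List String), Dom_filterCommand_py cmd → Spec_filterCommand_py cmd (filterCommand_py cmd)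

-- ===== LEMMAS AND PROOFS =====

def pvIsFlag (a : String) : Bool := a == "--username" || a == "--password"

-- whether cmd[j] exists and is a flag
def pvFlagAt (cmd : List String) (j : Nat) : Bool := (cmd[j]?.map pvIsFlag).getD false

-- A's loop body as structural recursion on the remaining list, mask carried
def pvGoA : List String → Bool → List String
  | [], _ => []
  | a :: rest, mask =>
      (if mask then "xxxxxx" else a) :: pvGoA rest (decide (a = "--username" ∨ a = "--password"))

theorem pvFoldlA (cmd : List String) (acc : List String) (mask : Bool) :
    (cmd.foldl (fun (st : List String × Bool) arg =>
      let st1 := if st.2 then (st.1 ++ ["xxxxxx"], false) else (st.1 ++ [arg], st.2)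
      if arg = "--username" ∨ arg = "--password" then (st1.1, true) else st1) (acc, mask)).1
    = acc ++ pvGoA cmd mask := by
  induction cmd generalizing acc mask with
  | nil => simp [pvGoA]
  | cons a rest ih =>
    by_cases hf : a = "--username" ∨ a = "--password" <;> cases mask <;>
      simp [pvGoA, List.foldl_cons, hf, ih]

-- per-index value of A's result, positions ≥ 1
theorem pvGoA_getElem_succ (cmd : List String) (mask : Bool) (j : Nat) :
    (pvGoA cmd mask)[j + 1]?
      = if pvFlagAt cmd j ∧ j + 1 < cmd.length then some "xxxxxx" else cmd[j + 1]? := by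
  induction cmd generalizing mask j with
  | nil => simp [pvGoA, pvFlagAt]
  | cons a rest ih =>
    cases j with
    | zero =>
      cases rest with
      | nil => simp [pvGoA, pvFlagAt]
      | cons b rs =>
        by_cases hf : a = "--username" ∨ a = "--password"
        · rcases hf with h | h <;> subst h <;> simp [pvGoA, pvFlagAt, pvIsFlag]
        · push Not at hf
          simp [pvGoA, pvFlagAt, pvIsFlag, hf.1, hf.2]
    | succ j' =>
      have := ih (mask := decide (a = "--username" ∨ a = "--password")) (j := j')
      simpa [pvGoA, pvFlagAt, Nat.succ_lt_succ_iff] using this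

theorem pvGoA_getElem_zero (cmd : List String) :
    (pvGoA cmd false)[0]? = cmd[0]? := by
  cases cmd <;> simp [pvGoA]

def pvStep (out : List String) (p : Nat × String) : List String :=
  if (p.2 = "--username" ∨ p.2 = "--password") ∧ p.1 + 1 < out.length
  then out.set (p.1 + 1) "xxxxxx" else out

theorem pvStep_length (out : List String) (p : Nat × String) :
    (pvStep out p).length = out.length := by
  unfold pvStep; split <;> simp

-- per-index value of B's fold: position j is "xxxxxx" iff some pair patches it
theorem pvFold_getElem (pairs : List (Nat × String)) (acc : List String) (j : Nat) :
    (pairs.foldl pvStep acc)[j]?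
      = if pairs.any (fun p => pvIsFlag p.2 && (p.1 + 1 == j) && decide (p.1 + 1 < acc.length))
        then some "xxxxxx" else acc[j]? := by
  induction pairs generalizing acc j with
  | nil => simp
  | cons p rest ih =>
    rw [List.foldl_cons, ih, List.any_cons]
    have hlen : (pvStep acc p).length = acc.length := pvStep_length acc p
    rw [hlen]
    by_cases hr : rest.any (fun q => pvIsFlag q.2 && (q.1 + 1 == j) && decide (q.1 + 1 < acc.length)) = true
    · simp [hr]
    · simp only [hr, Bool.or_false, if_false]
      unfold pvStep pvIsFlag
      by_cases hf : p.2 = "--username" ∨ p.2 = "--password"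
      · by_cases hlt : p.1 + 1 < acc.length
        · simp only [hf, hlt, and_self, if_true, if_pos (And.intro hf hlt)]
          rw [List.getElem?_set]
          by_cases hj : p.1 + 1 = j
          · subst hj
            rcases hf with h | h <;> simp [h, hlt]
          · have hb : (p.1 + 1 == j) = false := by simp [hj]
            rcases hf with h | h <;> simp [h, hb, hj]
        · have : ¬ ((p.2 = "--username" ∨ p.2 = "--password") ∧ p.1 + 1 < acc.length) :=
            fun h => hlt h.2
          rcases hf with h | h <;> simp [h, this, hlt]
      · push_neg at hf
        have : ¬ ((p.2 = "--username" ∨ p.2 = "--password") ∧ p.1 + 1 < acc.length) := by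
          rintro ⟨h, _⟩; exact absurd h (by tauto)
        simp [this, hf.1, hf.2]

-- the any over the enumeration collapses to a flag test at position j-1
theorem pvEnum_any (cmd : List String) (k : Nat) (j : Nat) (n : Nat) :
    (pvEnum k cmd).any (fun p => pvIsFlag p.2 && (p.1 + 1 == j) && decide (p.1 + 1 < n))
      = (decide (k < j) && pvFlagAt cmd (j - k - 1) && decide (j < n)) := by
  induction cmd generalizing k with
  | nil => simp [pvEnum, pvFlagAt]
  | cons a rest ih =>
    rw [pvEnum, List.any_cons, ih (k := k + 1)]
    by_cases hj : k + 1 = j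
    · subst hj
      have h0 : k + 1 - k - 1 = 0 := by omega
      simp [h0, pvFlagAt, pvIsFlag]
    · have h1 : (k + 1 == j) = false := by simp [hj]
      by_cases h2 : k + 1 < j
      · have h3 : (decide (k < j)) = true := by simp; omega
        have h4 : (decide (k + 1 < j)) = true := by simp [h2]
        have h5 : j - k - 1 = (j - (k + 1) - 1) + 1 := by omega
        simp [h1, h3, h4, h5, pvFlagAt]
      · have h3 : (decide (k < j)) = false := by simp; omega
        have h4 : (decide (k + 1 < j)) = false := by simp; omega
        simp [h1, h3, h4]

-- ===== VERDICT (by name: the statement is the Claim_ definition above) =====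
theorem filterCommand_py_spec : Claim_equal_filterCommand_py := by
  intro cmd _
  unfold Spec_filterCommand_py filterCommand_py filterCommand_py_alt
  rw [pvFoldlA, List.nil_append]
  refine congrArg (PySem.Str.join " ") (List.ext_getElem? fun j => ?_)
  show (pvGoA cmd false)[j]? = ((pvEnum 0 cmd).foldl pvStep cmd)[j]?
  rw [pvFold_getElem, pvEnum_any]
  cases j with
  | zero => simp [pvGoA_getElem_zero]
  | succ j' =>
    rw [pvGoA_getElem_succ]
    by_cases hf : pvFlagAt cmd j' = true <;> by_cases hl : j' + 1 < cmd.length <;>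
      simp [hf, hl, Nat.succ_sub_one]
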